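-- pv_equiv track=rewrite | github.com/james1projects/HatmasBotV3 | core/god_matcher.py | _slug_to_name
-- ===== SOURCE A (Python) =====
-- def _slug_to_name(slug):
--     """Convert CDN slug back to display name: 'hou-yi' → 'Hou Yi'."""
--     # Special cases
--     specials = {
--         "the-morrigan": "The Morrigan",
--         "morgan-le-fay": "Morgan Le Fay",
--         "baron-samedi": "Baron Samedi",
--         "ne-zha": "Ne Zha",
--         "nu-wa": "Nu Wa",
--         "hou-yi": "Hou Yi",
--         "hun-batz": "Hun Batz",
--         "sun-wukong": "Sun Wukong",
--         "jing-wei": "Jing Wei",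
--         "da-ji": "Da Ji",
--         "princess-bari": "Princess Bari",
--         "guan-yu": "Guan Yu",
--         "hua-mulan": "Hua Mulan",
--         "ah-muzen-cab": "Ah Muzen Cab",
--         "ah-puch": "Ah Puch",
--         "ao-kuang": "Ao Kuang",
--         "cu-chulainn": "Cu Chulainn",
--         "erlang-shen": "Erlang Shen",
--         "he-bo": "He Bo",
--         "king-arthur": "King Arthur",
--         "le-fay": "Le Fay",
--         "xing-tian": "Xing Tian",
--         "zhong-kui": "Zhong Kui",
--     }
--     if slug in specials:
--         return specials[slug]
--     # Default: capitalize each word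
--     return " ".join(word.capitalize() for word in slug.split("-"))
-- ===== SOURCE B (Python) =====
-- def _slug_to_name(slug):
--     """Convert CDN slug back to display name: 'hou-yi' -> 'Hou Yi'."""
--     # Every entry of A's specials table equals the plain capitalization, so the table is dropped.
--     return " ".join(word.capitalize() for word in slug.split("-"))
-- ===== Notes on version B (the rewrite author's own statement) =====
-- stated objective: simpler
-- what changed: Dropped the 23-entry specials dict and its membership branch: every value in the table is exactly what the default capitalize-each-word pass already produces, so B is the single join/split/capitalize expression.
import Mathlib
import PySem

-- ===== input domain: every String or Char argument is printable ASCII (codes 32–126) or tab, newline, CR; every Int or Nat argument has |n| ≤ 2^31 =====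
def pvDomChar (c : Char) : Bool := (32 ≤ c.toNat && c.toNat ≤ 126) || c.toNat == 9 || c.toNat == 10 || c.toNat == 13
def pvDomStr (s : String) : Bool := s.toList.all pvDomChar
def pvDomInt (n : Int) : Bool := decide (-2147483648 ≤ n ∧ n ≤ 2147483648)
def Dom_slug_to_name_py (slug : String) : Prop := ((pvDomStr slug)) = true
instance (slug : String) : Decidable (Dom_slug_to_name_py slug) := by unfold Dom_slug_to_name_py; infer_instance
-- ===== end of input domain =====

-- B drops A's 23-entry specials table: every table value equals the default capitalize-each-word pass, so one expression suffices (objective: simpler).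


-- ===== PORT A =====
-- word.capitalize(): first char upper-cased, the rest lower-cased (exact on ASCII)
def pyCapitalize (cs : List Char) : List Char :=
  match cs with
  | [] => []
  | c :: rest => PySem.Chars.upperChar c :: rest.map PySem.Chars.lowerChar

-- " ".join(word.capitalize() for word in slug.split("-"))
def pvDefaultName (slug : String) : String :=
  PySem.Str.join " " ((PySem.Chars.splitOn slug.toList "-".toList).map (fun w => String.ofList (pyCapitalize w)))

def pvSpecials : PySem.Dict String String := PySem.Dict.ofList
  [ ("the-morrigan", "The Morrigan"), ("morgan-le-fay", "Morgan Le Fay"),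
    ("baron-samedi", "Baron Samedi"), ("ne-zha", "Ne Zha"), ("nu-wa", "Nu Wa"),
    ("hou-yi", "Hou Yi"), ("hun-batz", "Hun Batz"), ("sun-wukong", "Sun Wukong"),
    ("jing-wei", "Jing Wei"), ("da-ji", "Da Ji"), ("princess-bari", "Princess Bari"),
    ("guan-yu", "Guan Yu"), ("hua-mulan", "Hua Mulan"), ("ah-muzen-cab", "Ah Muzen Cab"),
    ("ah-puch", "Ah Puch"), ("ao-kuang", "Ao Kuang"), ("cu-chulainn", "Cu Chulainn"),
    ("erlang-shen", "Erlang Shen"), ("he-bo", "He Bo"), ("king-arthur", "King Arthur"),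
    ("le-fay", "Le Fay"), ("xing-tian", "Xing Tian"), ("zhong-kui", "Zhong Kui") ]

def slug_to_name_py (slug : String) : String :=
  if pvSpecials.contains slug then (pvSpecials.get? slug).getD ""
  else pvDefaultName slug

-- ===== PORT B =====
def slug_to_name_py_alt (slug : String) : String :=
  PySem.Str.join " " ((PySem.Chars.splitOn slug.toList "-".toList).map (fun w => String.ofList (pyCapitalize w)))

-- ===== PRECONDITION & SPEC =====
def Spec_slug_to_name_py (slug : String) (out : String) : Prop := out = slug_to_name_py_alt slug
instance (slug : String) (out : String) : Decidable (Spec_slug_to_name_py slug out) := by unfold Spec_slug_to_name_py; infer_instance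

-- ===== CLAIM (what is proved, stated in full; the proofs are below) =====
def Claim_equal_slug_to_name_py : Prop := ∀ (slug : String), Dom_slug_to_name_py slug → Spec_slug_to_name_py slug (slug_to_name_py slug)

-- ===== LEMMAS AND PROOFS =====
theorem slug_to_name_eq (slug : String) : slug_to_name_py slug = slug_to_name_py_alt slug := by
  unfold slug_to_name_py
  split
  · rename_i hc
    have hmem : slug ∈ pvSpecials.keys := by
      simpa [PySem.Dict.contains_iff_mem_keys] using hc
    fin_cases hmem <;> decide
  · rfl

-- ===== VERDICT (by name: the statement is the Claim_ definition above) =====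
theorem slug_to_name_py_spec : Claim_equal_slug_to_name_py := by
  intro slug _
  exact slug_to_name_eq slug
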